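-- pv_equiv track=rewrite | github.com/flowerdonk/TIL | algorythm/IMTEST/BJ_2116.py | find_maxside_bottom
-- ===== SOURCE A (Python) =====
-- def find_maxside_bottom(Dice, bottom):
--     for i in range(6): # 인덱스 순환
--         if Dice[i] == bottom: # 아랫값을 가진 인덱스 찾기
--             idx = i # 인덱스
--             break
--
--     # (최대 옆면 값, 반대 값) 리턴
--     if idx == 1:
--         return (max(Dice[0], Dice[2], Dice[4], Dice[5]), Dice[3])
--     elif idx == 2:
--         return (max(Dice[0], Dice[1], Dice[3], Dice[5]), Dice[4])
--     elif idx == 3: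
--         return (max(Dice[0], Dice[2], Dice[4], Dice[5]), Dice[1])
--     elif idx == 4:
--         return (max(Dice[0], Dice[1], Dice[3], Dice[5]), Dice[2])
--     elif idx == 5:
--         return (max(Dice[1], Dice[2], Dice[3], Dice[4]), Dice[0])
--     elif idx == 0:
--         return (max(Dice[1], Dice[2], Dice[3], Dice[4]), Dice[5])
-- ===== SOURCE B (Python) =====
-- # Sort-then-scan rewrite: sort the six face indices by value (descending) once and
-- # take the first index that is neither the bottom face nor its opposite; the
-- # opposite face comes from the fixed pairing list instead of a 6-way branch chain.
-- OPP = [5, 3, 4, 1, 2, 0]  # opposite-face pairing: 0-5, 1-3, 2-4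
--
-- def find_maxside_bottom(Dice, bottom):
--     idx = Dice[:6].index(bottom)
--     opp = OPP[idx]
--     for k in sorted(range(6), key=lambda j: Dice[j], reverse=True):
--         if k != idx and k != opp:
--             return (Dice[k], Dice[opp])
-- ===== Notes on version B (the rewrite author's own statement) =====
-- stated objective: alternative
-- what changed: Instead of A's six-branch if/elif chain each hard-coding a 4-way max, B finds the bottom index with list slicing + .index, reads the opposite face from a fixed pairing list, and gets the max side face by sorting the six face indices by value descending and scanning for the first index that is neither bottom nor opposite.
import Mathlib
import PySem

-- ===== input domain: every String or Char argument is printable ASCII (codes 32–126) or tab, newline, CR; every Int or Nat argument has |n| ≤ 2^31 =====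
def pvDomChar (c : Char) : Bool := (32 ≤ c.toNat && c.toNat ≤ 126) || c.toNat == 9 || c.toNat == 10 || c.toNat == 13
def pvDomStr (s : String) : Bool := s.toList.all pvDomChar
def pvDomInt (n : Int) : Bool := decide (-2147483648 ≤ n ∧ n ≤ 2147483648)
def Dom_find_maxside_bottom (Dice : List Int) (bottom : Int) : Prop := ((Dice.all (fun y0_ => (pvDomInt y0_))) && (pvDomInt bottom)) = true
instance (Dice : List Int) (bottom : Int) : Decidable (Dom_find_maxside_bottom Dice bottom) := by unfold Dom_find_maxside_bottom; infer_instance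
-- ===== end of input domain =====

-- B replaces A's six-branch if/elif chain by slice+index for the bottom face, a fixed
-- opposite-pairing list, and a descending sort of the six face indices scanned for the
-- first admissible index (objective: alternative; same O(1) cost on a 6-face die).


-- ===== PORT A =====
-- 'for i in range(6): if Dice[i] == bottom: idx = i; break', iterating over range(6);
-- none = IndexError on Dice[i], or the loop finished without setting idx
-- (UnboundLocalError) — both outside Pre_.
def findIdxA (Dice : List Int) (bottom : Int) : List Int → Option Int
  | [] => none
  | i :: rest =>
    match PySem.List.pyGet? Dice i with
    | none => none
    | some v => if v = bottom then some i else findIdxA Dice bottom rest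

def find_maxside_bottom (Dice : List Int) (bottom : Int) : Int × Int :=
  match findIdxA Dice bottom (PySem.List.pyRange 0 6 1) with
  | none => (0, 0)  -- Python raises here; outside Pre_
  | some idx =>
    let g := fun (j : Int) => (PySem.List.pyGet? Dice j).getD 0  -- Dice[j]; getD 0 only reachable outside Pre_ (Python: IndexError)
    if idx = 1 then (max (max (max (g 0) (g 2)) (g 4)) (g 5), g 3)
    else if idx = 2 then (max (max (max (g 0) (g 1)) (g 3)) (g 5), g 4)
    else if idx = 3 then (max (max (max (g 0) (g 2)) (g 4)) (g 5), g 1)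
    else if idx = 4 then (max (max (max (g 0) (g 1)) (g 3)) (g 5), g 2)
    else if idx = 5 then (max (max (max (g 1) (g 2)) (g 3)) (g 4), g 0)
    else if idx = 0 then (max (max (max (g 1) (g 2)) (g 3)) (g 4), g 5)
    else (0, 0)  -- unreachable: findIdxA only returns indices from range(6)

-- ===== PORT B =====
-- the OPP pairing list of Source B
def oppList : List Int := [5, 3, 4, 1, 2, 0]

def find_maxside_bottom_alt (Dice : List Int) (bottom : Int) : Int × Int :=
  -- Dice[:6].index(bottom); none = ValueError, outside Pre_
  match PySem.List.index? (PySem.List.slice Dice none (some (6 : Int))) bottom with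
  | none => (0, 0)
  | some idx =>
    let g := fun (j : Int) => (PySem.List.pyGet? Dice j).getD 0  -- Dice[j]; getD 0 unreachable under Pre_
    let opp : Int := (PySem.List.pyGet? oppList (idx : Int)).getD 0  -- OPP[idx]
    -- for k in sorted(range(6), key=lambda j: Dice[j], reverse=True): if k != idx and k != opp: return …
    match (PySem.List.sorted (PySem.List.pyRange 0 6 1) (fun j => g j) true).find?
        (fun k => !(k == (idx : Int)) && !(k == opp)) with
    | none => (0, 0)  -- unreachable: four side indices always remain
    | some k => (g k, g opp)

-- ===== PRECONDITION & SPEC =====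
-- Pre_ excludes exactly the inputs where A raises: fewer than 6 faces (IndexError) or
-- bottom absent from the first six faces (UnboundLocalError on idx).
def Pre_find_maxside_bottom (Dice : List Int) (bottom : Int) : Prop :=
  6 ≤ Dice.length ∧ bottom ∈ Dice.take 6
instance (Dice : List Int) (bottom : Int) : Decidable (Pre_find_maxside_bottom Dice bottom) := by
  unfold Pre_find_maxside_bottom; infer_instance

def pvWitness_find_maxside_bottom : List Int × Int := ([1, 2, 3, 4, 5, 6], 3)

def Spec_find_maxside_bottom (Dice : List Int) (bottom : Int) (out : Int × Int) : Prop := out = find_maxside_bottom_alt Dice bottom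
instance (Dice : List Int) (bottom : Int) (out : Int × Int) : Decidable (Spec_find_maxside_bottom Dice bottom out) := by unfold Spec_find_maxside_bottom; infer_instance

-- ===== CLAIM (what is proved, stated in full; the proofs are below) =====
def Claim_equal_find_maxside_bottom : Prop := ∀ (Dice : List Int) (bottom : Int), Dom_find_maxside_bottom Dice bottom → Pre_find_maxside_bottom Dice bottom → Spec_find_maxside_bottom Dice bottom (find_maxside_bottom Dice bottom)

-- ===== LEMMAS AND PROOFS =====

theorem pyRange6 : PySem.List.pyRange 0 6 1 = [0, 1, 2, 3, 4, 5] := by decide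

-- find? on a list sorted descending by g returns an element maximal (under g) among
-- all elements satisfying the predicate, provided one exists.
theorem find_desc {A : Type} (g : A → Int) (P : A → Bool) :
    ∀ (L : List A), L.Pairwise (fun x y => g y ≤ g x) → ∀ x, x ∈ L → P x = true →
      ∃ k, L.find? P = some k ∧ P k = true ∧ k ∈ L ∧ ∀ y, y ∈ L → P y = true → g y ≤ g k := by
  intro L
  induction L with
  | nil => intro _ x hx; exact absurd hx (List.not_mem_nil)
  | cons h t ih =>
    intro hpair x hx hPx
    by_cases hPh : P h = true
    · refine ⟨h, by simp [List.find?, hPh], hPh, List.mem_cons_self, ?_⟩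
      intro y hy _
      rcases List.mem_cons.mp hy with rfl | hyt
      · exact le_refl _
      · exact (List.pairwise_cons.mp hpair).1 y hyt
    · have hxt : x ∈ t := by
        rcases List.mem_cons.mp hx with rfl | hxt
        · exact absurd hPx hPh
        · exact hxt
      obtain ⟨k, hfind, hPk, hkt, hbest⟩ :=
        ih (List.pairwise_cons.mp hpair).2 x hxt hPx
      refine ⟨k, ?_, hPk, List.mem_cons_of_mem _ hkt, ?_⟩
      · simp [List.find?, hPh, hfind]
      · intro y hy hPy
        rcases List.mem_cons.mp hy with rfl | hyt
        · exact absurd hPy hPh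
        · exact hbest y hyt hPy

-- The scan over the descending-sorted indices yields exactly the max of the four side
-- values, for any assignment g of values to the indices 0..5.
theorem alt_core (g : Int → Int) (idx opp s1 s2 s3 s4 : Int)
    (hcov : ∀ k : Int, k ∈ ([0, 1, 2, 3, 4, 5] : List Int) →
        (!(k == idx) && !(k == opp)) = true → k = s1 ∨ k = s2 ∨ k = s3 ∨ k = s4)
    (hm1 : s1 ∈ ([0, 1, 2, 3, 4, 5] : List Int)) (hp1 : (!(s1 == idx) && !(s1 == opp)) = true)
    (hm2 : s2 ∈ ([0, 1, 2, 3, 4, 5] : List Int)) (hp2 : (!(s2 == idx) && !(s2 == opp)) = true)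
    (hm3 : s3 ∈ ([0, 1, 2, 3, 4, 5] : List Int)) (hp3 : (!(s3 == idx) && !(s3 == opp)) = true)
    (hm4 : s4 ∈ ([0, 1, 2, 3, 4, 5] : List Int)) (hp4 : (!(s4 == idx) && !(s4 == opp)) = true) :
    ∃ k, (PySem.List.sorted ([0, 1, 2, 3, 4, 5] : List Int) (fun j => g j) true).find?
          (fun k => !(k == idx) && !(k == opp)) = some k
        ∧ g k = max (max (max (g s1) (g s2)) (g s3)) (g s4) := by
  have hpair := PySem.List.sorted_pairwise_rev ([0, 1, 2, 3, 4, 5] : List Int) (fun j => g j)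
  obtain ⟨k, hfind, hPk, hkL, hbest⟩ :=
    find_desc g (fun k => !(k == idx) && !(k == opp)) _ hpair s1
      ((PySem.List.mem_sorted _ _ _ _).mpr hm1) hp1
  refine ⟨k, hfind, ?_⟩
  have hk6 := (PySem.List.mem_sorted _ _ _ _).mp hkL
  have hk := hcov k hk6 hPk
  have b1 := hbest s1 ((PySem.List.mem_sorted _ _ _ _).mpr hm1) hp1
  have b2 := hbest s2 ((PySem.List.mem_sorted _ _ _ _).mpr hm2) hp2
  have b3 := hbest s3 ((PySem.List.mem_sorted _ _ _ _).mpr hm3) hp3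
  have b4 := hbest s4 ((PySem.List.mem_sorted _ _ _ _).mpr hm4) hp4
  rcases hk with rfl | rfl | rfl | rfl <;> omega

-- A's hand-written scan over range(6) and B's slice+index find the same first index.
set_option maxHeartbeats 1000000 in
theorem idx_eq (a b c d e f bottom : Int) (r : List Int) :
    findIdxA (a :: b :: c :: d :: e :: f :: r) bottom (PySem.List.pyRange 0 6 1) =
      (PySem.List.index? ([a, b, c, d, e, f] : List Int) bottom).map (fun n => (n : Int)) := by
  have p0 : PySem.List.pyGet? (a::b::c::d::e::f::r) (0:Int) = some a := by
    rw [show (0:Int) = ((0:Nat):Int) by norm_num, PySem.List.pyGet?_natCast]; rfl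
  have p1 : PySem.List.pyGet? (a::b::c::d::e::f::r) (1:Int) = some b := by
    rw [show (1:Int) = ((1:Nat):Int) by norm_num, PySem.List.pyGet?_natCast]; rfl
  have p2 : PySem.List.pyGet? (a::b::c::d::e::f::r) (2:Int) = some c := by
    rw [show (2:Int) = ((2:Nat):Int) by norm_num, PySem.List.pyGet?_natCast]; rfl
  have p3 : PySem.List.pyGet? (a::b::c::d::e::f::r) (3:Int) = some d := by
    rw [show (3:Int) = ((3:Nat):Int) by norm_num, PySem.List.pyGet?_natCast]; rfl
  have p4 : PySem.List.pyGet? (a::b::c::d::e::f::r) (4:Int) = some e := by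
    rw [show (4:Int) = ((4:Nat):Int) by norm_num, PySem.List.pyGet?_natCast]; rfl
  have p5 : PySem.List.pyGet? (a::b::c::d::e::f::r) (5:Int) = some f := by
    rw [show (5:Int) = ((5:Nat):Int) by norm_num, PySem.List.pyGet?_natCast]; rfl
  rw [pyRange6]
  by_cases h0 : a = bottom <;> by_cases h1 : b = bottom <;> by_cases h2 : c = bottom <;>
    by_cases h3 : d = bottom <;> by_cases h4 : e = bottom <;> by_cases h5 : f = bottom <;>
    simp_all [findIdxA, PySem.List.index?, List.idxOf?, List.findIdx?_cons]

-- On a die of ≥ 6 faces with bottom among the first six, the two ports agree.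
set_option maxHeartbeats 1000000 in
theorem find_maxside_bottom_agree (a b c d e f : Int) (r : List Int) (bottom : Int)
    (hb : bottom ∈ ([a, b, c, d, e, f] : List Int)) :
    find_maxside_bottom (a :: b :: c :: d :: e :: f :: r) bottom
      = find_maxside_bottom_alt (a :: b :: c :: d :: e :: f :: r) bottom := by
  obtain ⟨idx, hidx⟩ := Option.isSome_iff_exists.mp
    ((PySem.List.index?_isSome_iff ([a, b, c, d, e, f] : List Int) bottom).mpr hb)
  have hA : findIdxA (a :: b :: c :: d :: e :: f :: r) bottom (PySem.List.pyRange 0 6 1)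
      = some (idx : Int) := by
    rw [idx_eq, hidx]; rfl
  have hslice : PySem.List.slice (a :: b :: c :: d :: e :: f :: r) none (some (6 : Int))
      = ([a, b, c, d, e, f] : List Int) := by
    simpa using PySem.List.slice_to (a :: b :: c :: d :: e :: f :: r) (b := (6:Int)) (by norm_num)
  have hlt : idx < 6 := by
    obtain ⟨pre, suf, happ, hlen, -⟩ := (PySem.List.index?_eq_some_iff _ _ _).mp hidx
    have hl := congrArg List.length happ
    simp at hl
    omega
  have p0 : PySem.List.pyGet? (a::b::c::d::e::f::r) (0:Int) = some a := by
    rw [show (0:Int) = ((0:Nat):Int) by norm_num, PySem.List.pyGet?_natCast]; rfl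
  have p1 : PySem.List.pyGet? (a::b::c::d::e::f::r) (1:Int) = some b := by
    rw [show (1:Int) = ((1:Nat):Int) by norm_num, PySem.List.pyGet?_natCast]; rfl
  have p2 : PySem.List.pyGet? (a::b::c::d::e::f::r) (2:Int) = some c := by
    rw [show (2:Int) = ((2:Nat):Int) by norm_num, PySem.List.pyGet?_natCast]; rfl
  have p3 : PySem.List.pyGet? (a::b::c::d::e::f::r) (3:Int) = some d := by
    rw [show (3:Int) = ((3:Nat):Int) by norm_num, PySem.List.pyGet?_natCast]; rfl
  have p4 : PySem.List.pyGet? (a::b::c::d::e::f::r) (4:Int) = some e := by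
    rw [show (4:Int) = ((4:Nat):Int) by norm_num, PySem.List.pyGet?_natCast]; rfl
  have p5 : PySem.List.pyGet? (a::b::c::d::e::f::r) (5:Int) = some f := by
    rw [show (5:Int) = ((5:Nat):Int) by norm_num, PySem.List.pyGet?_natCast]; rfl
  unfold find_maxside_bottom find_maxside_bottom_alt
  rw [hA, hslice, hidx, pyRange6]
  interval_cases idx
  · -- idx = 0: opposite face 5, side faces [1, 2, 3, 4]
    obtain ⟨k, hfind, hgk⟩ := alt_core
      (fun j => (PySem.List.pyGet? (a::b::c::d::e::f::r) j).getD 0) 0 5 1 2 3 4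
      (by decide) (by decide) (by decide) (by decide) (by decide) (by decide) (by decide)
      (by decide) (by decide)
    simp only [Nat.cast_zero,
      show PySem.List.pyGet? oppList (0:Int) = some (5:Int) from by decide,
      Option.getD_some, hfind]
    rw [hgk]
    simp only [p0, p1, p2, p3, p4, p5, Option.getD_some]
    norm_num
  · -- idx = 1: opposite face 3, side faces [0, 2, 4, 5]
    obtain ⟨k, hfind, hgk⟩ := alt_core
      (fun j => (PySem.List.pyGet? (a::b::c::d::e::f::r) j).getD 0) 1 3 0 2 4 5
      (by decide) (by decide) (by decide) (by decide) (by decide) (by decide) (by decide)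
      (by decide) (by decide)
    simp only [Nat.cast_one,
      show PySem.List.pyGet? oppList (1:Int) = some (3:Int) from by decide,
      Option.getD_some, hfind]
    rw [hgk]
    simp only [p0, p1, p2, p3, p4, p5, Option.getD_some]
    norm_num
  · -- idx = 2: opposite face 4, side faces [0, 1, 3, 5]
    obtain ⟨k, hfind, hgk⟩ := alt_core
      (fun j => (PySem.List.pyGet? (a::b::c::d::e::f::r) j).getD 0) 2 4 0 1 3 5
      (by decide) (by decide) (by decide) (by decide) (by decide) (by decide) (by decide)
      (by decide) (by decide)
    simp only [Nat.cast_ofNat,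
      show PySem.List.pyGet? oppList (2:Int) = some (4:Int) from by decide,
      Option.getD_some, hfind]
    rw [hgk]
    simp only [p0, p1, p2, p3, p4, p5, Option.getD_some]
    norm_num
  · -- idx = 3: opposite face 1, side faces [0, 2, 4, 5]
    obtain ⟨k, hfind, hgk⟩ := alt_core
      (fun j => (PySem.List.pyGet? (a::b::c::d::e::f::r) j).getD 0) 3 1 0 2 4 5
      (by decide) (by decide) (by decide) (by decide) (by decide) (by decide) (by decide)
      (by decide) (by decide)
    simp only [Nat.cast_ofNat,
      show PySem.List.pyGet? oppList (3:Int) = some (1:Int) from by decide,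
      Option.getD_some, hfind]
    rw [hgk]
    simp only [p0, p1, p2, p3, p4, p5, Option.getD_some]
    norm_num
  · -- idx = 4: opposite face 2, side faces [0, 1, 3, 5]
    obtain ⟨k, hfind, hgk⟩ := alt_core
      (fun j => (PySem.List.pyGet? (a::b::c::d::e::f::r) j).getD 0) 4 2 0 1 3 5
      (by decide) (by decide) (by decide) (by decide) (by decide) (by decide) (by decide)
      (by decide) (by decide)
    simp only [Nat.cast_ofNat,
      show PySem.List.pyGet? oppList (4:Int) = some (2:Int) from by decide,
      Option.getD_some, hfind]
    rw [hgk]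
    simp only [p0, p1, p2, p3, p4, p5, Option.getD_some]
    norm_num
  · -- idx = 5: opposite face 0, side faces [1, 2, 3, 4]
    obtain ⟨k, hfind, hgk⟩ := alt_core
      (fun j => (PySem.List.pyGet? (a::b::c::d::e::f::r) j).getD 0) 5 0 1 2 3 4
      (by decide) (by decide) (by decide) (by decide) (by decide) (by decide) (by decide)
      (by decide) (by decide)
    simp only [Nat.cast_ofNat,
      show PySem.List.pyGet? oppList (5:Int) = some (0:Int) from by decide,
      Option.getD_some, hfind]
    rw [hgk]
    simp only [p0, p1, p2, p3, p4, p5, Option.getD_some]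
    norm_num

-- ===== VERDICT (by name: the statement is the Claim_ definition above) =====
theorem find_maxside_bottom_spec : Claim_equal_find_maxside_bottom := by
  intro Dice bottom _ hpre
  obtain ⟨hlen, hmem⟩ := hpre
  match Dice, hlen with
  | a :: b :: c :: d :: e :: f :: r, _ =>
    exact find_maxside_bottom_agree a b c d e f r bottom (by simpa [List.take] using hmem)
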